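-- pv_equiv track=rewrite | github.com/man2machine/6111-fpga-final-project | fpga_nn_backend/fpga_simple/emulation.py | linear_layer_mac_loop
-- ===== SOURCE A (Python) =====
-- def linear_layer_mac_loop(
--     M,
--     CHW,
--     input_addr,
--     weight_addr,
--     output_addr):
--     # Shapes:
--     # input: (CHW,)
--     # weight: (M, CHW)
--     # bias: (M,)
--     # output: (M,)
--
--     CHWm = 0
--     for m in range(M):
--         # output
--         addr_o = m + output_addr
--
--         for chw in range(CHW):
--             # input
--             addr_i = chw + input_addr
--             # weight
--             addr_w = CHWm + chw + weight_addr
--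
--             yield (addr_i, addr_w, addr_o)
--
--             # o[m] = o[m] + i[chw] * w[CHW*m + chw];
--
--         CHWm += CHW
-- ===== SOURCE B (Python) =====
-- def linear_layer_mac_loop(M, CHW, input_addr, weight_addr, output_addr):
--     row = None
--     for m in range(M):
--         if row is None:
--             row = [(chw + input_addr, chw + weight_addr) for chw in range(CHW)]
--         off = m * CHW
--         addr_o = m + output_addr
--         for addr_i, addr_w in row:
--             yield (addr_i, addr_w + off, addr_o)
-- ===== Notes on version B (the rewrite author's own statement) =====
-- stated objective: alternative
-- what changed: B builds the first row's (input, weight) address pairs once (lazily, on first use) and emits each row by translating that fixed row with a per-row weight offset m*CHW, instead of A's nested recomputation with a running CHWm accumulator.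
import Mathlib
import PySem

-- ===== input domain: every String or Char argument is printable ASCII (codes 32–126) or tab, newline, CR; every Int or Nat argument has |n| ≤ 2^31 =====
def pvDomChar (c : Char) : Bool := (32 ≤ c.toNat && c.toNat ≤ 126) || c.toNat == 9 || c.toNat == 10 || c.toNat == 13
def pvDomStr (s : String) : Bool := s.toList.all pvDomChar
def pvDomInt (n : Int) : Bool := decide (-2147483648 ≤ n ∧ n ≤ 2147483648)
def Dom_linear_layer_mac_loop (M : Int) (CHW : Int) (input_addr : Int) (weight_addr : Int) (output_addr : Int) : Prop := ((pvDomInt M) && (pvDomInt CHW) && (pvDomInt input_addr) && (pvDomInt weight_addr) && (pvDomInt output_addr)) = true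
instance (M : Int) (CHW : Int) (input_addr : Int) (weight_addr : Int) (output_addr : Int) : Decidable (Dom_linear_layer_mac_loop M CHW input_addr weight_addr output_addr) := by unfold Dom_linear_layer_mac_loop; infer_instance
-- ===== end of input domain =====

-- B materializes the first row's (input, weight) address pairs once and emits each row by translating that row with a per-row weight offset (alternative decomposition, same cost).


-- ===== PORT A =====
-- nested loops: outer over m with running CHWm accumulator, inner over chw appending one triple
def linear_layer_mac_loop (M : Int) (CHW : Int) (input_addr : Int) (weight_addr : Int) (output_addr : Int) : List (Int × Int × Int) :=
  let r := (PySem.List.pyRange 0 M 1).foldl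
    (fun (st : Int × List (Int × Int × Int)) m =>
      let CHWm := st.1
      let addr_o := m + output_addr
      let acc := (PySem.List.pyRange 0 CHW 1).foldl
        (fun acc chw =>
          let addr_i := chw + input_addr
          let addr_w := CHWm + chw + weight_addr
          acc ++ [(addr_i, addr_w, addr_o)]) st.2
      (CHWm + CHW, acc))
    ((0 : Int), ([] : List (Int × Int × Int)))
  r.2

-- ===== PORT B =====
-- first row's (input, weight) address pairs built once (lazily, on first use);
-- each row emitted by translating it with offset m*CHW
def linear_layer_mac_loop_alt (M : Int) (CHW : Int) (input_addr : Int) (weight_addr : Int) (output_addr : Int) : List (Int × Int × Int) :=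
  let r := (PySem.List.pyRange 0 M 1).foldl
    (fun (st : Option (List (Int × Int)) × List (Int × Int × Int)) m =>
      let row := match st.1 with
        | none => (PySem.List.pyRange 0 CHW 1).map (fun chw => (chw + input_addr, chw + weight_addr))
        | some r => r
      let off := m * CHW
      let addr_o := m + output_addr
      (some row, st.2 ++ row.map (fun p => (p.1, p.2 + off, addr_o))))
    (none, ([] : List (Int × Int × Int)))
  r.2

-- ===== PRECONDITION & SPEC =====
def Spec_linear_layer_mac_loop (M : Int) (CHW : Int) (input_addr : Int) (weight_addr : Int) (output_addr : Int) (out : List (Int × Int × Int)) : Prop := out = linear_layer_mac_loop_alt M CHW input_addr weight_addr output_addr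
instance (M : Int) (CHW : Int) (input_addr : Int) (weight_addr : Int) (output_addr : Int) (out : List (Int × Int × Int)) : Decidable (Spec_linear_layer_mac_loop M CHW input_addr weight_addr output_addr out) := by unfold Spec_linear_layer_mac_loop; infer_instance

-- ===== CLAIM (what is proved, stated in full; the proofs are below) =====
def Claim_equal_linear_layer_mac_loop : Prop := ∀ (M : Int) (CHW : Int) (input_addr : Int) (weight_addr : Int) (output_addr : Int), Dom_linear_layer_mac_loop M CHW input_addr weight_addr output_addr → Spec_linear_layer_mac_loop M CHW input_addr weight_addr output_addr (linear_layer_mac_loop M CHW input_addr weight_addr output_addr)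

-- ===== LEMMAS AND PROOFS =====

-- canonical form both ports are reduced to
def pvCanon (CHW ia wa oa M : Int) : List (Int × Int × Int) :=
  (PySem.List.pyRange 0 M 1).flatMap (fun m =>
    (PySem.List.pyRange 0 CHW 1).map (fun k => (k + ia, m * CHW + k + wa, m + oa)))

-- inner loop of A: appending singletons is mapping the row
theorem pvInner_eq (CHW ia wa : Int) (CHWm addr_o : Int) (acc : List (Int × Int × Int)) :
    (PySem.List.pyRange 0 CHW 1).foldl
      (fun acc chw => acc ++ [(chw + ia, CHWm + chw + wa, addr_o)]) acc =
    acc ++ (PySem.List.pyRange 0 CHW 1).map (fun k => (k + ia, CHWm + k + wa, addr_o)) :=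
  PySem.List.foldl_append_singleton_eq_map _ _ _

-- outer loop of A from an arbitrary CHWm/acc state
theorem pvOuter_eq (CHW ia wa oa : Int) (n : Nat) (c0 : Int) (acc : List (Int × Int × Int)) :
    (PySem.List.pyRange 0 (n : Int) 1).foldl
      (fun (st : Int × List (Int × Int × Int)) m =>
        (st.1 + CHW,
          (PySem.List.pyRange 0 CHW 1).foldl
            (fun acc chw => acc ++ [(chw + ia, st.1 + chw + wa, m + oa)]) st.2))
      (c0, acc) =
    (c0 + (n : Int) * CHW,
      acc ++ (PySem.List.pyRange 0 (n : Int) 1).flatMap (fun m =>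
        (PySem.List.pyRange 0 CHW 1).map (fun k => (k + ia, c0 + m * CHW + k + wa, m + oa)))) := by
  induction n generalizing c0 acc with
  | zero => simp [PySem.List.pyRange_one_eq_nil]
  | succ n ih =>
    have hn : (0 : Int) ≤ (n : Int) := Int.natCast_nonneg n
    rw [show ((n + 1 : Nat) : Int) = (n : Int) + 1 by push_cast; ring,
        PySem.List.pyRange_one_succ_right hn, List.foldl_append, ih]
    simp only [List.foldl_cons, List.foldl_nil, pvInner_eq, List.flatMap_append,
      List.flatMap_cons, List.flatMap_nil, List.append_nil, List.append_assoc]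
    refine Prod.ext ?_ rfl
    ring

-- A reduces to the canonical form (for 0 ≤ M; vacuous rows when CHW ≤ 0)
theorem pvA_eq_canon (M CHW ia wa oa : Int) (hM : 0 ≤ M) :
    linear_layer_mac_loop M CHW ia wa oa = pvCanon CHW ia wa oa M := by
  obtain ⟨n, rfl⟩ := Int.eq_ofNat_of_zero_le hM
  unfold linear_layer_mac_loop
  rw [pvOuter_eq]
  simp [pvCanon]

-- B's loop once the row is materialized: the row is carried unchanged and appends flatten
theorem pvBloop_eq (CHW ia wa oa : Int) (n : Nat) (a : Int)
    (R : List (Int × Int)) (acc : List (Int × Int × Int)) :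
    (PySem.List.pyRange a (a + (n : Int)) 1).foldl
      (fun (st : Option (List (Int × Int)) × List (Int × Int × Int)) m =>
        let row := match st.1 with
          | none => (PySem.List.pyRange 0 CHW 1).map (fun chw => (chw + ia, chw + wa))
          | some r => r
        (some row, st.2 ++ row.map (fun p => (p.1, p.2 + m * CHW, m + oa))))
      (some R, acc) =
    (some R, acc ++ (PySem.List.pyRange a (a + (n : Int)) 1).flatMap
      (fun m => R.map (fun p => (p.1, p.2 + m * CHW, m + oa)))) := by
  induction n generalizing a acc with
  | zero => simp [PySem.List.pyRange_one_eq_nil]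
  | succ n ih =>
    have hc : a < a + ((n : Int) + 1) := by omega
    rw [show a + ((n + 1 : Nat) : Int) = a + ((n : Int) + 1) by push_cast; ring,
        PySem.List.pyRange_one_cons hc]
    simp only [List.foldl_cons]
    rw [show a + ((n : Int) + 1) = (a + 1) + (n : Int) by ring, ih]
    simp only [List.flatMap_cons, List.append_assoc]

-- B reduces to the canonical form
theorem pvB_eq_canon (M CHW ia wa oa : Int) :
    linear_layer_mac_loop_alt M CHW ia wa oa = pvCanon CHW ia wa oa M := by
  unfold linear_layer_mac_loop_alt pvCanon
  by_cases hM : 0 < M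
  · rw [PySem.List.pyRange_one_cons hM]
    simp only [List.foldl_cons, List.nil_append]
    have hn : M = 1 + ((M - 1).toNat : Int) := by omega
    rw [show (1 : Int) = 0 + 1 from by ring] at hn
    rw [hn, pvBloop_eq]
    simp only [List.flatMap_cons, List.map_map]
    congr 1
    · refine List.map_congr_left (fun k _ => ?_)
      simp only [Function.comp]
      exact Prod.ext rfl (Prod.ext (by ring) rfl)
    · refine List.flatMap_congr (fun m _ => ?_)
      refine List.map_congr_left (fun k _ => ?_)
      simp only [Function.comp]
      exact Prod.ext rfl (Prod.ext (by ring) rfl)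
  · rw [PySem.List.pyRange_one_eq_nil (show M ≤ 0 from by omega)]
    rfl

-- ===== VERDICT (by name: the statement is the Claim_ definition above) =====
theorem linear_layer_mac_loop_spec : Claim_equal_linear_layer_mac_loop := by
  intro M CHW ia wa oa _
  unfold Spec_linear_layer_mac_loop
  rw [pvB_eq_canon]
  by_cases hM : 0 ≤ M
  · exact pvA_eq_canon M CHW ia wa oa hM
  · have hA : linear_layer_mac_loop M CHW ia wa oa = [] := by
      unfold linear_layer_mac_loop
      simp [PySem.List.pyRange_one_eq_nil (show M ≤ 0 from by omega)]
    rw [hA, pvCanon, PySem.List.pyRange_one_eq_nil (show M ≤ 0 from by omega)]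
    rfl
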